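-- pv_equiv track=rewrite | github.com/Enjef/Algo | 1900 - 1999/1967 - Number of Strings That Appear as Substrings in Word/1967 - Number of Strings That Appear as Substrings in Word.py | numOfStrings_best_memory
-- ===== SOURCE A (Python) =====
-- from typing import List
--
-- def numOfStrings_best_memory(patterns: List[str], word: str) -> int:
--     def isValid(string1, string2):
--         l1 = len(string1)
--         l2 = len(string2)
--         if l1 > l2:
--             return False
--         if string1 in string2:
--             return True
--         return False
--     res = 0
--     for pattern in patterns:
--         if isValid(pattern, word):
--             res += 1
--     return res
-- ===== SOURCE B (Python) =====
-- def numOfStrings_best_memory(patterns, word):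
--     n = len(word)
--     subs = set()
--     for l in {len(p) for p in patterns}:
--         for i in range(n - l + 1):
--             subs.add(word[i:i + l])
--     return sum(1 for p in patterns if p in subs)
-- ===== Notes on version B (the rewrite author's own statement) =====
-- stated objective: faster
-- what changed: B builds, once, a set of all substrings of word whose length is some pattern's length, then answers each pattern by a set lookup, instead of A's per-pattern substring scan of word.
import Mathlib
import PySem

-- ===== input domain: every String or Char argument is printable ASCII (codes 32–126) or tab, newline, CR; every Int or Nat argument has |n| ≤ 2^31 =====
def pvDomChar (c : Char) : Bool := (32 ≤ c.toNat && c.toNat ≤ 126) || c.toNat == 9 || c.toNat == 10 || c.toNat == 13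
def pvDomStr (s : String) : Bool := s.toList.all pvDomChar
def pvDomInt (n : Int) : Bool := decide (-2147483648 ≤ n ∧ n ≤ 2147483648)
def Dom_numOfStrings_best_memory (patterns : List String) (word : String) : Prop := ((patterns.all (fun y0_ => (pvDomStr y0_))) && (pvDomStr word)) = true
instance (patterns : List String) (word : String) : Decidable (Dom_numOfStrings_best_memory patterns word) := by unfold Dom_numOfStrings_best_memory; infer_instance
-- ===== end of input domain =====

-- B precomputes one set of all substrings of word whose length is some pattern's length, then answers
-- each pattern by a set lookup, instead of A's per-pattern substring scan with a length pre-check.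

-- ===== PORT A =====
def pvIsValid (string1 string2 : String) : Bool :=
  let l1 := PySem.Str.len string1
  let l2 := PySem.Str.len string2
  if l1 > l2 then false
  else if PySem.Str.isIn string1 string2 then true
  else false

def numOfStrings_best_memory (patterns : List String) (word : String) : Int :=
  patterns.foldl (fun res pattern => if pvIsValid pattern word then res + 1 else res) 0

-- ===== PORT B =====
-- subs = set(); for l in {len(p) for p in patterns}: for i in range(n - l + 1): subs.add(word[i:i+l])
def pvSubs (patterns : List String) (word : String) : PySem.Set String :=
  let n := PySem.Str.len word
  (PySem.Set.ofList (patterns.map (fun p => PySem.Str.len p))).foldl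
    (fun subs l =>
      (PySem.List.pyRange 0 (n - l + 1) 1).foldl
        (fun subs i => PySem.Set.add subs (PySem.Str.slice word (some i) (some (i + l)))) subs)
    PySem.Set.empty

def numOfStrings_best_memory_alt (patterns : List String) (word : String) : Int :=
  let subs := pvSubs patterns word
  patterns.foldl (fun res p => if PySem.Set.contains subs p then res + 1 else res) 0

-- ===== PRECONDITION & SPEC =====
def Spec_numOfStrings_best_memory (patterns : List String) (word : String) (out : Int) : Prop := out = numOfStrings_best_memory_alt patterns word
instance (patterns : List String) (word : String) (out : Int) : Decidable (Spec_numOfStrings_best_memory patterns word out) := by unfold Spec_numOfStrings_best_memory; infer_instance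

-- ===== CLAIM (what is proved, stated in full; the proofs are below) =====
def Claim_equal_numOfStrings_best_memory : Prop := ∀ (patterns : List String) (word : String), Dom_numOfStrings_best_memory patterns word → Spec_numOfStrings_best_memory patterns word (numOfStrings_best_memory patterns word)

-- ===== LEMMAS AND PROOFS =====

-- membership in a fold that only adds elements
theorem pv_mem_foldl_add {β : Type} (xs : List β) (f : β → String) (s0 : PySem.Set String) (y : String) :
    y ∈ xs.foldl (fun s x => PySem.Set.add s (f x)) s0 ↔ y ∈ s0 ∨ ∃ x ∈ xs, y = f x := by
  induction xs generalizing s0 with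
  | nil => simp
  | cons a as ih =>
    rw [List.foldl_cons, ih]
    rw [PySem.Set.mem_add]
    simp only [List.mem_cons]
    constructor
    · rintro (⟨h | h⟩ | ⟨x, hx, rfl⟩)
      · exact Or.inl h
      · exact Or.inr ⟨a, Or.inl rfl, h⟩
      · exact Or.inr ⟨x, Or.inr hx, rfl⟩
    · rintro (h | ⟨x, (rfl | hx), rfl⟩)
      · exact Or.inl (Or.inl h)
      · exact Or.inl (Or.inr rfl)
      · exact Or.inr ⟨x, hx, rfl⟩

-- membership in the nested fold building pvSubs
theorem pv_mem_subs_fold (L : List Int) (word : String) (n : Int) (s0 : PySem.Set String) (y : String) :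
    y ∈ L.foldl (fun s l => (PySem.List.pyRange 0 (n - l + 1) 1).foldl
        (fun s i => PySem.Set.add s (PySem.Str.slice word (some i) (some (i + l)))) s) s0
    ↔ y ∈ s0 ∨ ∃ l ∈ L, ∃ i ∈ PySem.List.pyRange 0 (n - l + 1) 1,
        y = PySem.Str.slice word (some i) (some (i + l)) := by
  induction L generalizing s0 with
  | nil => simp
  | cons a as ih =>
    rw [List.foldl_cons, ih, pv_mem_foldl_add]
    simp only [List.mem_cons]
    constructor
    · rintro (⟨h | h⟩ | ⟨l, hl, h⟩)
      · exact Or.inl h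
      · exact Or.inr ⟨a, Or.inl rfl, h⟩
      · exact Or.inr ⟨l, Or.inr hl, h⟩
    · rintro (h | ⟨l, (rfl | hl), h⟩)
      · exact Or.inl (Or.inl h)
      · exact Or.inl (Or.inr h)
      · exact Or.inr ⟨l, hl, h⟩

-- for a pattern of the input list, membership in B's substring set is exactly being an infix of word
theorem mem_pvSubs_iff (patterns : List String) (word p : String) (hp : p ∈ patterns) :
    p ∈ pvSubs patterns word ↔ p.toList <:+: word.toList := by
  unfold pvSubs
  rw [pv_mem_subs_fold]
  constructor
  · rintro (h | ⟨l, hl, i, hi, rfl⟩)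
    · exact absurd h (by simp [PySem.Set.empty])
    · rw [PySem.Set.mem_ofList, List.mem_map] at hl
      obtain ⟨q, _, rfl⟩ := hl
      rw [PySem.List.mem_pyRange_one] at hi
      have h0q : (0 : Int) ≤ PySem.Str.len q := by rw [PySem.Str.len_eq]; positivity
      have h : (PySem.Str.slice word (some i) (some (i + PySem.Str.len q))).toList
          = List.take ((i + PySem.Str.len q).toNat - i.toNat) (List.drop i.toNat word.toList) := by
        rw [PySem.Str.toList_slice, PySem.Chars.slice_eq_listSlice,
          PySem.List.slice_toNat _ hi.1 (by omega)]
      rw [h]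
      exact (List.take_prefix _ _).isInfix.trans (List.drop_suffix _ _).isInfix
  · rintro ⟨s, t, hst⟩
    have hlen : s.length + p.toList.length + t.length = word.toList.length := by
      rw [← hst]; simp; omega
    refine Or.inr ⟨PySem.Str.len p, ?_, (s.length : Int), ?_, ?_⟩
    · rw [PySem.Set.mem_ofList, List.mem_map]
      exact ⟨p, hp, rfl⟩
    · rw [PySem.List.mem_pyRange_one, PySem.Str.len_eq, PySem.Str.len_eq]
      constructor
      · positivity
      · omega
    · apply String.toList_inj.mp
      rw [PySem.Str.toList_slice, PySem.Chars.slice_eq_listSlice, PySem.Str.len_eq,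
        PySem.List.slice_toNat _ (by positivity) (by positivity)]
      have h1 : ((s.length : Int) + (p.toList.length : Int)).toNat - (s.length : Int).toNat
          = p.toList.length := by omega
      have h2 : (s.length : Int).toNat = s.length := by omega
      rw [h1, h2, ← hst]
      simp

-- per-pattern: B's set lookup equals A's isValid check
theorem contains_eq_isValid (patterns : List String) (word p : String) (hp : p ∈ patterns) :
    PySem.Set.contains (pvSubs patterns word) p = pvIsValid p word := by
  have hmem : PySem.Set.contains (pvSubs patterns word) p = true ↔ p.toList <:+: word.toList := by
    have h : PySem.Set.contains (pvSubs patterns word) p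
        = List.contains (pvSubs patterns word) p := rfl
    rw [h, List.contains_iff_mem, mem_pvSubs_iff patterns word p hp]
  unfold pvIsValid
  rw [PySem.Str.len_eq, PySem.Str.len_eq]
  by_cases h : p.toList <:+: word.toList
  · have hle : ¬ ((word.toList.length : Int) < (p.toList.length : Int)) := by
      have := h.length_le; omega
    have hin : PySem.Str.isIn p word = true := (PySem.Str.isIn_iff_infix p word).mpr h
    rw [hmem.mpr h]
    simp only [gt_iff_lt, hle, if_false, hin, if_true]
  · have hin : PySem.Str.isIn p word = false :=
      Bool.eq_false_iff.mpr (fun hc => h ((PySem.Str.isIn_iff_infix p word).mp hc))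
    have hcon : PySem.Set.contains (pvSubs patterns word) p = false :=
      Bool.eq_false_iff.mpr (fun hc => h (hmem.mp hc))
    rw [hcon, hin]
    simp

-- ===== VERDICT (by name: the statement is the Claim_ definition above) =====
theorem numOfStrings_best_memory_spec : Claim_equal_numOfStrings_best_memory := by
  intro patterns word _
  unfold Spec_numOfStrings_best_memory numOfStrings_best_memory numOfStrings_best_memory_alt
  exact (PySem.List.foldl_congr_mem patterns _ _ 0
    (fun res p hp => by rw [contains_eq_isValid patterns word p hp])).symm
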